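-- pv_equiv track=rewrite | github.com/Tuminha/women-and-business | scripts/parse_posts.py | parse_rows
-- ===== SOURCE A (Python) =====
-- def parse_rows(block: str):
--     rows = []
--     depth = 0
--     in_str = False
--     quote = ''
--     start = None
--     i = 0
--     while i < len(block):
--         ch = block[i]
--         if in_str:
--             if ch == '\\':
--                 i += 2
--                 continue
--             if ch == quote:
--                 in_str = False
--             i += 1
--             continue
--         if ch in ("'", '"'):
--             in_str = True
--             quote = ch
--             i += 1
--             continue
--         if ch == '(':
--             if depth == 0:
--                 start = i + 1
--             depth += 1
--         elif ch == ')':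
--             depth -= 1
--             if depth == 0 and start is not None:
--                 rows.append(block[start:i])
--         i += 1
--     return rows
-- ===== SOURCE B (Python) =====
-- def parse_rows(block: str):
--     # Pass 1: indices of characters lying outside any string literal.
--     n = len(block)
--     idxs = []
--     i = 0
--     while i < n:
--         ch = block[i]
--         if ch in ("'", '"'):
--             i += 1
--             while i < n:
--                 c = block[i]
--                 if c == '\\':
--                     i += 2
--                 elif c == ch:
--                     i += 1
--                     break
--                 else:
--                     i += 1
--         else:
--             idxs.append(i)
--             i += 1
--     # Pass 2: paren depth over the active positions only.
--     rows = []
--     depth = 0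
--     start = None
--     for i in idxs:
--         ch = block[i]
--         if ch == '(':
--             if depth == 0:
--                 start = i + 1
--             depth += 1
--         elif ch == ')':
--             depth -= 1
--             if depth == 0 and start is not None:
--                 rows.append(block[start:i])
--     return rows
-- ===== Notes on version B (the rewrite author's own statement) =====
-- stated objective: alternative
-- what changed: Replaces A's single fused state machine (depth+string state interleaved in one while loop) with two separate passes: a first scan that collects the indices outside string literals (with the backslash skip-two rule as a dedicated inner loop), then a second pass tracking paren depth over those indices only.
import Mathlib
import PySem

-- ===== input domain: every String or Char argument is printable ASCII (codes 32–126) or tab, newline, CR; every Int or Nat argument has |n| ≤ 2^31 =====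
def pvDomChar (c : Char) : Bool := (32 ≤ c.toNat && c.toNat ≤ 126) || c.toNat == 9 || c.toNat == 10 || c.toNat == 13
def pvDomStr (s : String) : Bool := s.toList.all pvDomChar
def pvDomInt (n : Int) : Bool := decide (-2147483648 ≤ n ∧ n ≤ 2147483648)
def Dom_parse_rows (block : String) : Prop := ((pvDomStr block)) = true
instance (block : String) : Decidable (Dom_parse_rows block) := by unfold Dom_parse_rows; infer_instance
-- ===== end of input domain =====

-- B is an alternative decomposition of A (same cost): a first pass collecting the
-- indices outside string literals, then a paren-depth pass over those indices only.

-- ===== PORT A =====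
-- Literal transliteration of A's fused while loop; the whole mutable state
-- (i, depth, in_str, quote, start, rows) is carried through the recursion.
-- block[start:i] with 0 ≤ start ≤ i is ported as (cs.drop start).take (i-start),
-- exact for these in-range nonnegative indices.
def parseA_loop (cs : List Char) (i : Nat) (depth : Int) (inStr : Bool) (quote : Char)
    (start : Option Nat) (rows : List String) : List String :=
  if h : i < cs.length then
    let ch := cs[i]
    if inStr then
      if ch = '\\' then
        parseA_loop cs (i + 2) depth inStr quote start rows
      else if ch = quote then
        parseA_loop cs (i + 1) depth false quote start rows
      else
        parseA_loop cs (i + 1) depth inStr quote start rows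
    else if ch = '\'' ∨ ch = '"' then
      parseA_loop cs (i + 1) depth true ch start rows
    else if ch = '(' then
      if depth = 0 then
        parseA_loop cs (i + 1) (depth + 1) inStr quote (some (i + 1)) rows
      else
        parseA_loop cs (i + 1) (depth + 1) inStr quote start rows
    else if ch = ')' then
      if depth - 1 = 0 then
        match start with
        | some s => parseA_loop cs (i + 1) (depth - 1) inStr quote start
            (rows ++ [String.ofList ((cs.drop s).take (i - s))])
        | none => parseA_loop cs (i + 1) (depth - 1) inStr quote start rows
      else
        parseA_loop cs (i + 1) (depth - 1) inStr quote start rows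
    else
      parseA_loop cs (i + 1) depth inStr quote start rows
  else rows
termination_by cs.length - i
decreasing_by all_goals omega

def parse_rows (block : String) : List String :=
  parseA_loop block.toList 0 0 false ' ' none []

-- ===== PORT B =====
-- Pass 1 inner loop: consume a string literal opened by quote q; returns the exit index.
def skipStrB (cs : List Char) (q : Char) (i : Nat) : Nat :=
  if h : i < cs.length then
    let c := cs[i]
    if c = '\\' then skipStrB cs q (i + 2)
    else if c = q then i + 1
    else skipStrB cs q (i + 1)
  else i
termination_by cs.length - i
decreasing_by all_goals omega

theorem skipStrB_ge (cs : List Char) (q : Char) (i : Nat) : i ≤ skipStrB cs q i := by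
  fun_induction skipStrB cs q i with
  | case1 => omega
  | case2 => omega
  | case3 => omega
  | case4 => omega

-- Pass 1: the indices of block lying outside any string literal (in increasing order).
def activeIdxsB (cs : List Char) (i : Nat) : List Nat :=
  if h : i < cs.length then
    let ch := cs[i]
    if ch = '\'' ∨ ch = '"' then activeIdxsB cs (skipStrB cs ch (i + 1))
    else i :: activeIdxsB cs (i + 1)
  else []
termination_by cs.length - i
decreasing_by
  · have := skipStrB_ge cs cs[i] (i + 1); omega
  · omega

-- Pass 2 body: one step of the paren-depth scan at active index i.
def stepB (cs : List Char) (st : List String × Int × Option Nat) (i : Nat) :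
    List String × Int × Option Nat :=
  let rows := st.1
  let depth := st.2.1
  let start := st.2.2
  let ch := cs.getD i ' '
  if ch = '(' then
    if depth = 0 then (rows, depth + 1, some (i + 1)) else (rows, depth + 1, start)
  else if ch = ')' then
    if depth - 1 = 0 then
      match start with
      | some s => (rows ++ [String.ofList ((cs.drop s).take (i - s))], depth - 1, start)
      | none => (rows, depth - 1, start)
    else (rows, depth - 1, start)
  else st

def parse_rows_alt (block : String) : List String :=
  let cs := block.toList
  ((activeIdxsB cs 0).foldl (stepB cs) ([], 0, none)).1

-- ===== PRECONDITION & SPEC =====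
def Spec_parse_rows (block : String) (out : List String) : Prop := out = parse_rows_alt block
instance (block : String) (out : List String) : Decidable (Spec_parse_rows block out) := by unfold Spec_parse_rows; infer_instance

-- ===== CLAIM (what is proved, stated in full; the proofs are below) =====
def Claim_equal_parse_rows : Prop := ∀ (block : String), Dom_parse_rows block → Spec_parse_rows block (parse_rows block)

-- ===== LEMMAS AND PROOFS =====

-- Inside a string literal, A's fused loop does exactly what B's inner skip loop does:
-- it jumps to the exit index and turns in_str off, touching no other state.
theorem parseA_in_str (cs : List Char) (q : Char) (i : Nat) (depth : Int)
    (start : Option Nat) (rows : List String) :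
    parseA_loop cs i depth true q start rows
      = parseA_loop cs (skipStrB cs q i) depth false q start rows := by
  fun_induction skipStrB cs q i with
  | case1 i h c hc ih =>
    rw [parseA_loop.eq_def]
    simp only [show c = cs[i] from rfl] at hc
    simp only [h, dif_pos, hc, if_pos]
    exact ih
  | case2 i h c hc hq =>
    rw [parseA_loop.eq_def]
    simp only [show c = cs[i] from rfl] at hc hq
    simp [h, hq]
    intro hv
    exact absurd (hq.trans hv) hc
  | case3 i h c hc hq ih =>
    rw [parseA_loop.eq_def]
    simp only [show c = cs[i] from rfl] at hc hq
    simp only [h, dif_pos, hc, hq, ite_false, ite_true]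
    exact ih
  | case4 i h =>
    rw [parseA_loop.eq_def]
    conv_rhs => rw [parseA_loop.eq_def]
    simp [h]

-- Main invariant: from any out-of-string state, A's fused loop equals B's second pass
-- folded over the remaining active indices.

theorem parseA_eq_fold (cs : List Char) (i : Nat) (depth : Int) (q : Char)
    (start : Option Nat) (rows : List String) :
    parseA_loop cs i depth false q start rows
      = ((activeIdxsB cs i).foldl (stepB cs) (rows, depth, start)).1 := by
  fun_induction activeIdxsB cs i generalizing depth q start rows with
  | case1 i h ch hq ih =>
    rw [parseA_loop.eq_def]
    simp only [show ch = cs[i] from rfl] at hq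
    simp only [h, dif_pos, Bool.false_eq_true, if_pos hq, ite_false]
    rw [parseA_in_str]
    exact ih depth cs[i] start rows
  | case2 i h ch hq ih =>
    rw [parseA_loop.eq_def, List.foldl_cons]
    simp only [show ch = cs[i] from rfl] at hq
    have hget : cs.getD i ' ' = cs[i] := List.getD_eq_getElem cs ' ' h
    simp only [h, dif_pos, Bool.false_eq_true, if_neg hq, ite_false]
    by_cases hp : cs[i] = '('
    · by_cases hd : depth = 0
      · rw [if_pos hp, if_pos hd,
          show stepB cs (rows, depth, start) i = (rows, depth + 1, some (i + 1)) by
            simp [stepB, List.getD, List.getElem?_eq_getElem h, hp, hd]]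
        exact ih _ q _ _
      · rw [if_pos hp, if_neg hd,
          show stepB cs (rows, depth, start) i = (rows, depth + 1, start) by
            simp [stepB, List.getD, List.getElem?_eq_getElem h, hp, hd]]
        exact ih _ q _ _
    · by_cases hr : cs[i] = ')'
      · by_cases hd : depth - 1 = 0
        · cases start with
          | some s =>
            rw [if_neg hp, if_pos hr, if_pos hd,
              show stepB cs (rows, depth, some s) i
                  = (rows ++ [String.ofList ((cs.drop s).take (i - s))], depth - 1, some s) by
                simp [stepB, List.getD, List.getElem?_eq_getElem h, hr, hd]]
            exact ih _ q _ _
          | none =>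
            rw [if_neg hp, if_pos hr, if_pos hd,
              show stepB cs (rows, depth, (none : Option Nat)) i = (rows, depth - 1, none) by
                simp [stepB, List.getD, List.getElem?_eq_getElem h, hr, hd]]
            exact ih _ q _ _
        · rw [if_neg hp, if_pos hr, if_neg hd,
            show stepB cs (rows, depth, start) i = (rows, depth - 1, start) by
              simp [stepB, List.getD, List.getElem?_eq_getElem h, hr, hd]]
          exact ih _ q _ _
      · rw [if_neg hp, if_neg hr,
          show stepB cs (rows, depth, start) i = (rows, depth, start) by
            simp [stepB, List.getD, List.getElem?_eq_getElem h, hp, hr]]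
        exact ih _ q _ _
  | case3 i h =>
    rw [parseA_loop.eq_def]
    simp [h]

-- ===== VERDICT (by name: the statement is the Claim_ definition above) =====
theorem parse_rows_spec : Claim_equal_parse_rows := by
  intro block _
  unfold Spec_parse_rows parse_rows parse_rows_alt
  exact parseA_eq_fold block.toList 0 0 ' ' none []
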